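-- pv_equiv track=rewrite | github.com/HQSquantumsimulations/hqstage-examples | HQS_Workshop_2025/NMR/utils.py | positive_magnetization_bitstrings
-- ===== SOURCE A (Python) =====
-- from itertools import combinations
--
-- def positive_magnetization_bitstrings(n: int):
--     """
--     Yield X-basis product states with strictly positive total σ_x magnetization.
--
--     For odd ``n``, this yields exactly half of all bitstrings (2^(n-1)). For even
--     ``n``, bitstrings with zero total σ_x (k = n/2 ones) are omitted. The function
--     yields tuples of length ``n`` with entries 0 (|+>) or 1 (|->). Order is
--     deterministic: ascending number of ones (|->) and lexicographic within each
--     Hamming weight.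
--
--     Parameters
--     ----------
--     n : int
--         Number of qubits.
--
--     Yields
--     ------
--     tuple[int, ...]
--         Bitstrings in the X basis with strictly positive Σ_i σ_x^i.
--     """
--     max_ones = (n - 1) // 2  # <= floor((n-1)/2)
--     for k in range(0, max_ones + 1):  # number of |-> entries ("1"s)
--         for ones in combinations(range(n), k):
--             bits = [0] * n
--             for j in ones:
--                 bits[j] = 1
--             yield tuple(bits)
-- ===== SOURCE B (Python) =====
-- def positive_magnetization_bitstrings(n: int):
--     """Same enumeration, but builds the bitstrings directly by a recursive
--     head-first decomposition (first entry 1 then 0), with no index subsets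
--     and no marking pass."""
--     def gen(m, k):
--         # all 0/1 tuples of length m with exactly k ones, in A's order
--         if k == 0:
--             yield (0,) * m
--         elif m == 0:
--             return
--         else:
--             for rest in gen(m - 1, k - 1):
--                 yield (1,) + rest
--             for rest in gen(m - 1, k):
--                 yield (0,) + rest
--     for k in range((n - 1) // 2 + 1):
--         yield from gen(n, k)
-- ===== Notes on version B (the rewrite author's own statement) =====
-- stated objective: alternative
-- what changed: B replaces itertools.combinations over index subsets plus a marking pass with a recursive head-first generator that builds each 0/1 tuple directly (choose 1 then 0 for the leading entry), yielding the same order.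
import Mathlib
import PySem

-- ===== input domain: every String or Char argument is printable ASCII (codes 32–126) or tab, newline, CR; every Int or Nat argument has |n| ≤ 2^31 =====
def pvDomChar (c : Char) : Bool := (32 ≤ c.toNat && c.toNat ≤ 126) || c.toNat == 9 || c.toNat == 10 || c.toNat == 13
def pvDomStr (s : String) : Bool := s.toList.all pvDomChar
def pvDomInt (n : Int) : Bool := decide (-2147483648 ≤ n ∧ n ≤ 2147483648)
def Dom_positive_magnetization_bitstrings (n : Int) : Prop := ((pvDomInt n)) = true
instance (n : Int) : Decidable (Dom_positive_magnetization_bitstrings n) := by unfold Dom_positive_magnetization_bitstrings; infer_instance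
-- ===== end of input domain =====

-- B enumerates the same bitstrings by a head-first recursion on the tuple itself
-- instead of marking index subsets from itertools.combinations (objective: alternative
-- decomposition; return value = the list of all yielded tuples).

-- ===== PORT A =====
-- port of itertools.combinations(l, k): k-subsets as ascending sublists, lexicographic
-- by positions (matches CPython's documented order)
def pyCombinations : Nat → List Int → List (List Int)
  | 0, _ => [[]]
  | _ + 1, [] => []
  | k + 1, x :: xs => (pyCombinations k xs).map (fun c => x :: c) ++ pyCombinations (k + 1) xs

def positive_magnetization_bitstrings (n : Int) : List (List Int) :=
  let max_ones := PySem.Int.floordiv (n - 1) 2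
  -- k comes from range(0, max_ones+1) so k ≥ 0 and k.toNat is exact;
  -- bits[j] = 1 with j ∈ range(n) is always in range, pySetD is exact there;
  -- [0] * n is [] for n ≤ 0, which List.replicate n.toNat 0 matches.
  (PySem.List.pyRange 0 (max_ones + 1) 1).foldl
    (fun acc k =>
      (pyCombinations k.toNat (PySem.List.pyRange 0 n 1)).foldl
        (fun acc2 ones =>
          acc2 ++ [ones.foldl (fun bits j => PySem.List.pySetD bits j (1 : Int))
                     (List.replicate n.toNat (0 : Int))]) acc) []

-- ===== PORT B =====
-- gen(m, k): all 0/1 tuples of length m with exactly k ones, head chosen first (1 then 0)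
def genAlt : Nat → Nat → List (List Int)
  | m, 0 => [List.replicate m 0]
  | 0, _ + 1 => []
  | m + 1, k + 1 => (genAlt m k).map (fun r => 1 :: r) ++ (genAlt m (k + 1)).map (fun r => 0 :: r)

def positive_magnetization_bitstrings_alt (n : Int) : List (List Int) :=
  -- gen is only reached with k ≥ 0 and n ≥ 1 (the k-range is empty otherwise), so toNat is exact
  (PySem.List.pyRange 0 (PySem.Int.floordiv (n - 1) 2 + 1) 1).foldl
    (fun acc k => acc ++ genAlt n.toNat k.toNat) []

-- ===== PRECONDITION & SPEC =====
def Spec_positive_magnetization_bitstrings (n : Int) (out : List (List Int)) : Prop := out = positive_magnetization_bitstrings_alt n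
instance (n : Int) (out : List (List Int)) : Decidable (Spec_positive_magnetization_bitstrings n out) := by unfold Spec_positive_magnetization_bitstrings; infer_instance

-- ===== CLAIM (what is proved, stated in full; the proofs are below) =====
def Claim_equal_positive_magnetization_bitstrings : Prop := ∀ (n : Int), Dom_positive_magnetization_bitstrings n → Spec_positive_magnetization_bitstrings n (positive_magnetization_bitstrings n)

-- ===== LEMMAS AND PROOFS =====

-- marking the chosen positions into an all-zero list of length m (A's inner body)
def pvMark (m : Nat) : List Int → List Int :=
  List.foldl (fun bits j => PySem.List.pySetD bits j (1 : Int)) (List.replicate m (0 : Int))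

theorem pyCombinations_map (f : Int → Int) :
    ∀ (k : Nat) (l : List Int),
      pyCombinations k (l.map f) = (pyCombinations k l).map (List.map f) := by
  intro k
  induction k with
  | zero => intro l; simp [pyCombinations]
  | succ k ih =>
    intro l
    induction l with
    | nil => simp [pyCombinations]
    | cons x xs ihl =>
      simp [pyCombinations, ih, ihl, Function.comp]

theorem mem_of_mem_pyCombinations :
    ∀ (k : Nat) (l ones : List Int), ones ∈ pyCombinations k l → ∀ x ∈ ones, x ∈ l := by
  intro k
  induction k with
  | zero =>
    intro l ones h x hx
    simp [pyCombinations] at h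
    subst h; simp at hx
  | succ k ih =>
    intro l
    induction l with
    | nil => intro ones h; simp [pyCombinations] at h
    | cons y ys ihl =>
      intro ones h x hx
      simp only [pyCombinations, List.mem_append, List.mem_map] at h
      rcases h with ⟨c, hc, rfl⟩ | h
      · rcases List.mem_cons.mp hx with rfl | hx'
        · exact List.mem_cons_self
        · exact List.mem_cons_of_mem _ (ih ys c hc x hx')
      · exact List.mem_cons_of_mem _ (ihl ones h x hx)

-- setting shifted positions into b :: bits leaves the head alone
theorem foldl_pySetD_shift :
    ∀ (ones : List Int), (∀ j ∈ ones, 0 ≤ j) → ∀ (b : Int) (bits : List Int),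
      (ones.map (· + 1)).foldl (fun bits j => PySem.List.pySetD bits j (1 : Int)) (b :: bits)
        = b :: ones.foldl (fun bits j => PySem.List.pySetD bits j (1 : Int)) bits := by
  intro ones
  induction ones with
  | nil => intro _ b bits; simp
  | cons j js ih =>
    intro h b bits
    have hj : (0 : Int) ≤ j := h j List.mem_cons_self
    have hstep : PySem.List.pySetD (b :: bits) (j + 1) (1 : Int)
        = b :: PySem.List.pySetD bits j (1 : Int) := by
      rw [PySem.List.pySetD_of_nonneg _ _ (by omega), PySem.List.pySetD_of_nonneg _ _ hj]
      have : (j + 1).toNat = j.toNat + 1 := by omega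
      simp [this]
    simp only [List.map_cons, List.foldl_cons, hstep]
    exact ih (fun x hx => h x (List.mem_cons_of_mem _ hx)) b _

theorem pyRange_zero_succ (m : Nat) :
    PySem.List.pyRange 0 ((m : Int) + 1) 1
      = 0 :: (PySem.List.pyRange 0 (m : Int) 1).map (· + 1) := by
  rw [PySem.List.pyRange_one, PySem.List.pyRange_one]
  simp [List.range_succ_eq_map, Function.comp, add_comm]

-- the heart: marking each combination of range(m) equals B's direct generator
theorem pvMark_pyCombinations :
    ∀ (m : Nat) (k : Nat),
      (pyCombinations k (PySem.List.pyRange 0 (m : Int) 1)).map (pvMark m) = genAlt m k := by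
  intro m
  induction m with
  | zero =>
    intro k
    cases k with
    | zero => simp [pyCombinations, genAlt, pvMark]
    | succ k => simp [pyCombinations, genAlt]
  | succ m ih =>
    intro k
    cases k with
    | zero => simp [pyCombinations, genAlt, pvMark]
    | succ k =>
      have hrange := pyRange_zero_succ m
      push_cast
      rw [hrange]
      simp only [pyCombinations, List.map_append, List.map_map, pyCombinations_map]
      have h1 : ∀ ones ∈ pyCombinations k (PySem.List.pyRange 0 (m : Int) 1),
          pvMark (m + 1) (0 :: ones.map (· + 1)) = 1 :: pvMark m ones := by
        intro ones hmem
        have hpos : ∀ j ∈ ones, (0 : Int) ≤ j := by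
          intro j hj
          have := mem_of_mem_pyCombinations _ _ _ hmem j hj
          exact (PySem.List.mem_pyRange_one.mp this).1
        unfold pvMark
        simp only [List.foldl_cons]
        have hset : PySem.List.pySetD (List.replicate (m + 1) (0 : Int)) 0 (1 : Int)
            = 1 :: List.replicate m (0 : Int) := by
          rw [PySem.List.pySetD_of_nonneg _ _ le_rfl]
          simp [List.replicate_succ]
        rw [hset, foldl_pySetD_shift ones hpos]
      have h2 : ∀ ones ∈ pyCombinations (k + 1) (PySem.List.pyRange 0 (m : Int) 1),
          pvMark (m + 1) (ones.map (· + 1)) = 0 :: pvMark m ones := by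
        intro ones hmem
        have hpos : ∀ j ∈ ones, (0 : Int) ≤ j := by
          intro j hj
          have := mem_of_mem_pyCombinations _ _ _ hmem j hj
          exact (PySem.List.mem_pyRange_one.mp this).1
        unfold pvMark
        rw [List.replicate_succ, foldl_pySetD_shift ones hpos]
      simp only [Function.comp_def]
      rw [List.map_congr_left h1, List.map_congr_left h2]
      simp only [genAlt]
      rw [← ih k, ← ih (k + 1)]
      simp [List.map_map, Function.comp_def]

theorem pyRange_zero_toNat (n : Int) :
    PySem.List.pyRange 0 n 1 = PySem.List.pyRange 0 (n.toNat : Int) 1 := by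
  rcases le_or_gt 0 n with h | h
  · rw [Int.toNat_of_nonneg h]
  · rw [PySem.List.pyRange_one_eq_nil (by omega), PySem.List.pyRange_one_eq_nil (by omega)]

-- A's inner double loop for one k collapses to appending B's gen block
theorem stepA_eq (n : Int) (acc : List (List Int)) (k : Int) :
    (pyCombinations k.toNat (PySem.List.pyRange 0 n 1)).foldl
      (fun acc2 ones =>
        acc2 ++ [ones.foldl (fun bits j => PySem.List.pySetD bits j (1 : Int))
                   (List.replicate n.toNat (0 : Int))]) acc
      = acc ++ genAlt n.toNat k.toNat := by
  rw [PySem.List.foldl_append_singleton_eq_map, pyRange_zero_toNat]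
  exact congrArg (acc ++ ·) (pvMark_pyCombinations n.toNat k.toNat)

-- ===== VERDICT (by name: the statement is the Claim_ definition above) =====
theorem positive_magnetization_bitstrings_spec : Claim_equal_positive_magnetization_bitstrings := by
  intro n _
  unfold Spec_positive_magnetization_bitstrings
  unfold positive_magnetization_bitstrings positive_magnetization_bitstrings_alt
  simp only [stepA_eq]
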